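-- pv_equiv track=rewrite | github.com/bigodetexas-dashboard/serv-brasil-sul-dashboard | fix_markdown_lint.py | fix_blanks_around_headings
-- ===== SOURCE A (Python) =====
-- def fix_blanks_around_headings(content: str) -> str:
--     """Adiciona linhas em branco antes e depois de headings."""
--     lines = content.split('\n')
--     fixed_lines = []
--
--     for i, line in enumerate(lines):
--         # Verifica se é um heading
--         if line.strip().startswith('#'):
--             # Adiciona linha em branco antes (se não for a primeira linha)
--             if i > 0 and fixed_lines and fixed_lines[-1].strip() != '':
--                 fixed_lines.append('')
--
--             fixed_lines.append(line)
--
--             # Adiciona linha em branco depois (se não for a última linha)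
--             if i < len(lines) - 1 and lines[i + 1].strip() != '':
--                 fixed_lines.append('')
--         else:
--             fixed_lines.append(line)
--
--     return '\n'.join(fixed_lines)
-- ===== SOURCE B (Python) =====
-- def fix_blanks_around_headings(content: str) -> str:
--     """Adiciona linhas em branco antes e depois de headings (regra por par de linhas adjacentes)."""
--     lines = content.split('\n')
--     out = lines[:1]
--     for prev, cur in zip(lines, lines[1:]):
--         prev_head = prev.strip().startswith('#')
--         cur_head = cur.strip().startswith('#')
--         if (prev_head and cur.strip() != '') or (cur_head and prev.strip() != ''):
--             out.append('')
--         out.append(cur)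
--     return '\n'.join(out)
-- ===== Notes on version B (the rewrite author's own statement) =====
-- stated objective: simpler
-- what changed: A builds the output statefully, deciding the before-blank by re-inspecting the last element of the output list and the after-blank by lookahead; B instead makes one symmetric per-gap decision over each adjacent pair of the ORIGINAL lines (insert a blank iff one side is a heading and both sides are nonblank) and never reads the output.
import Mathlib
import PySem

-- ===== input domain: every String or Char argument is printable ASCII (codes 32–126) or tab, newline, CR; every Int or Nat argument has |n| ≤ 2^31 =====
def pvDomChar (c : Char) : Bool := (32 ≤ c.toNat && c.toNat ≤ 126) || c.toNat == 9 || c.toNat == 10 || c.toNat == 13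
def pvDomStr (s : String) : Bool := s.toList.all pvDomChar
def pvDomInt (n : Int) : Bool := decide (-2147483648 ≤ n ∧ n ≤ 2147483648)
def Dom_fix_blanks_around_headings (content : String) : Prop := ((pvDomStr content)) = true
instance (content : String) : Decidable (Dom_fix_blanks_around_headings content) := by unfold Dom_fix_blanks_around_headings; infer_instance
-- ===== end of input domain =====

-- B replaces A's stateful loop (which re-inspects the output list's last element) by a
-- per-gap rule over adjacent pairs of the ORIGINAL lines; same return value, simpler decomposition.

-- ===== PORT A =====
-- A's test `i < len(lines)-1 and lines[i+1].strip() != ''`, read off the remaining lines (same value)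
def nextNonblankA : List String → Bool
  | next :: _ => PySem.Str.strip next != ""
  | [] => false

-- A's loop: state = fixed_lines (built by appending), i the Python loop counter;
-- fixed_lines[-1] on a nonempty list is its last element (getLastD).
def fixALoop : List String → Nat → List String → List String
  | [], _, acc => acc
  | line :: rest, i, acc =>
    if PySem.Str.startswith (PySem.Str.strip line) "#" then
      let acc1 := if decide (i > 0) && !acc.isEmpty && (PySem.Str.strip (acc.getLastD "") != "") then acc ++ [""] else acc
      let acc2 := acc1 ++ [line]
      let acc3 := if nextNonblankA rest then acc2 ++ [""] else acc2
      fixALoop rest (i + 1) acc3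
    else
      fixALoop rest (i + 1) (acc ++ [line])

def fix_blanks_around_headings (content : String) : String :=
  PySem.Str.join "\n" (fixALoop ((PySem.Str.split? content "\n").getD []) 0 [])

-- ===== PORT B =====
def isHeadB (s : String) : Bool := PySem.Str.startswith (PySem.Str.strip s) "#"

-- Source B's loop over zip(lines, lines[1:]): recursion on (prev, remaining lines)
def fixBLoop : String → List String → List String
  | _, [] => []
  | prev, cur :: rest =>
    (if (isHeadB prev && (PySem.Str.strip cur != "")) || (isHeadB cur && (PySem.Str.strip prev != "")) then
       ["", cur]
     else [cur]) ++ fixBLoop cur rest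

def fix_blanks_around_headings_alt (content : String) : String :=
  match (PySem.Str.split? content "\n").getD [] with
  | [] => ""
  | first :: rest => PySem.Str.join "\n" (first :: fixBLoop first rest)

-- ===== PRECONDITION & SPEC =====
def Spec_fix_blanks_around_headings (content : String) (out : String) : Prop := out = fix_blanks_around_headings_alt content
instance (content : String) (out : String) : Decidable (Spec_fix_blanks_around_headings content out) := by unfold Spec_fix_blanks_around_headings; infer_instance

-- ===== CLAIM (what is proved, stated in full; the proofs are below) =====
def Claim_equal_fix_blanks_around_headings : Prop := ∀ (content : String), Dom_fix_blanks_around_headings content → Spec_fix_blanks_around_headings content (fix_blanks_around_headings content)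

-- ===== LEMMAS AND PROOFS =====

-- a heading line strips to a nonempty string
lemma isHeadB_strip_ne (s : String) (h : isHeadB s = true) : (PySem.Str.strip s != "") = true := by
  rcases he : PySem.Str.strip s != "" with _ | _
  · simp only [bne_eq_false_iff_eq] at he
    rw [isHeadB, he] at h
    exact absurd h (by decide)
  · rfl

-- main invariant: once past the first line, A's accumulator ends with prev plus the pending
-- after-blank exactly when prev is a heading and the next original line is nonblank, and from
-- there A appends exactly what B's per-gap recursion produces.
lemma fixALoop_eq_fixBLoop (rest : List String) : ∀ (prev : String) (i : Nat) (acc0 : List String),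
    1 ≤ i →
    fixALoop rest i (acc0 ++ [prev] ++ (if isHeadB prev && nextNonblankA rest then [""] else [])) =
      acc0 ++ [prev] ++ fixBLoop prev rest := by
  induction rest with
  | nil => intro prev i acc0 _; simp [fixALoop, fixBLoop, nextNonblankA]
  | cons cur rest' ih =>
    intro prev i acc0 hi
    have hi0 : decide (i > 0) = true := by simp; omega
    by_cases hc : isHeadB cur = true
    · have hsc : (PySem.Str.strip cur != "") = true := isHeadB_strip_ne cur hc
      by_cases hp : isHeadB prev = true
      · -- prev heading: its after-blank is already in the accumulator; A adds no before-blank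
        have H := ih cur (i + 1) (acc0 ++ [prev] ++ [""]) (by omega)
        simp only [hc, Bool.true_and] at H
        simp only [nextNonblankA, hp, hsc, Bool.and_self, if_true, Bool.true_and]
        simp only [fixALoop, isHeadB] at *
        simp only [hc, if_pos rfl] at *
        simp only [List.append_assoc, List.getLastD_concat] at *
        have hse : PySem.Str.strip "" = "" := by decide
        simp only [fixBLoop, isHeadB, hc, hp, hsc, Bool.true_and, Bool.or_true, Bool.true_or, if_pos rfl]
        rcases hnn : nextNonblankA rest' with _ | _ <;>
          simp only [hnn, Bool.and_false, Bool.and_true, Bool.false_eq_true, if_false, if_pos rfl] at H ⊢ <;>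
          simpa [hse, List.append_assoc] using H
      · -- prev not a heading: A's before-blank test reads prev from the accumulator
        have hpf : isHeadB prev = false := by simpa using hp
        simp only [nextNonblankA, hpf, Bool.false_and, Bool.false_eq_true, if_false]
        simp only [fixALoop, isHeadB] at *
        simp only [hc, if_pos rfl]
        simp only [List.append_assoc, List.getLastD_concat, List.singleton_append] at *
        have hne : ((acc0 ++ prev :: []).isEmpty) = false := by simp
        simp only [hne, Bool.not_false, Bool.and_true, hi0, Bool.true_and]
        simp only [fixBLoop, isHeadB, hpf, hc, hsc, Bool.false_and, Bool.false_or, Bool.true_and]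
        by_cases hsp : (PySem.Str.strip prev != "") = true
        · have H := ih cur (i + 1) (acc0 ++ [prev] ++ [""]) (by omega)
          simp only [hc, Bool.true_and] at H
          simp only [hsp, if_pos rfl]
          rcases hnn : nextNonblankA rest' with _ | _ <;>
            simp only [hnn, Bool.false_eq_true, if_false, if_pos rfl] at H ⊢ <;>
            simpa [List.append_assoc] using H
        · have hspf : (PySem.Str.strip prev != "") = false := by simpa using hsp
          have H := ih cur (i + 1) (acc0 ++ [prev]) (by omega)
          simp only [hc, Bool.true_and] at H
          simp only [hspf, Bool.false_eq_true, if_false]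
          rcases hnn : nextNonblankA rest' with _ | _ <;>
            simp only [hnn, Bool.false_eq_true, if_false, if_pos rfl] at H ⊢ <;>
            simpa [List.append_assoc] using H
    · -- cur not a heading: A appends cur plainly; B's gap rule is exactly A's pending blank
      have hcf : isHeadB cur = false := by simpa using hc
      simp only [fixALoop, isHeadB] at *
      simp only [hcf, Bool.false_eq_true, if_false]
      simp only [fixBLoop, isHeadB, hcf, Bool.false_and, Bool.or_false]
      have H := ih cur (i + 1)
          (acc0 ++ [prev] ++ (if isHeadB prev && (PySem.Str.strip cur != "") then [""] else [])) (by omega)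
      simp only [isHeadB, hcf, Bool.false_and, Bool.false_eq_true, if_false, List.append_nil] at H
      simp only [nextNonblankA, isHeadB]
      by_cases hb : (PySem.Str.startswith (PySem.Str.strip prev) "#" && (PySem.Str.strip cur != "")) = true
      · simp only [hb, if_pos rfl] at H ⊢
        simpa [List.append_assoc] using H
      · have hbf : (PySem.Str.startswith (PySem.Str.strip prev) "#" && (PySem.Str.strip cur != "")) = false := by
          simpa using hb
        simp only [hbf, Bool.false_eq_true, if_false, List.append_nil] at H ⊢
        simpa [List.append_assoc] using H

-- unrolling A's first iteration gives exactly the invariant's shape with acc0 = []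
lemma fixALoop_first (first : String) (rest : List String) :
    fixALoop (first :: rest) 0 [] =
      fixALoop rest 1 ([] ++ [first] ++ (if isHeadB first && nextNonblankA rest then [""] else [])) := by
  simp only [fixALoop, isHeadB]
  by_cases hh : PySem.Str.startswith (PySem.Str.strip first) "#" = true
  · simp only [hh, if_pos rfl]
    have : (decide ((0:Nat) > 0) && !(List.isEmpty ([] : List String)) && (PySem.Str.strip (([] : List String).getLastD "") != "")) = false := by decide
    simp only [this, Bool.false_eq_true, if_false, List.nil_append, Bool.true_and]
    rcases hnn : nextNonblankA rest with _ | _ <;>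
      simp [hnn]
  · have hhf : PySem.Chars.startswith (PySem.Chars.strip first.toList) ['#'] = false := by simpa using hh
    simp [hhf]

-- ===== VERDICT (by name: the statement is the Claim_ definition above) =====
theorem fix_blanks_around_headings_spec : Claim_equal_fix_blanks_around_headings := by
  intro content _
  show fix_blanks_around_headings content = fix_blanks_around_headings_alt content
  rcases hl : (PySem.Str.split? content "\n").getD [] with _ | ⟨first, rest⟩
  · simp only [fix_blanks_around_headings, fix_blanks_around_headings_alt, hl, fixALoop]
    decide
  · simp only [fix_blanks_around_headings, fix_blanks_around_headings_alt, hl]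
    rw [fixALoop_first, fixALoop_eq_fixBLoop rest first 1 [] (le_refl 1)]
    simp
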